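-- pv_equiv track=rewrite | github.com/lshwa/Algorithm | 프로그래머스/0/181926. 수 조작하기 1/수 조작하기 1.py | solution
-- ===== SOURCE A (Python) =====
-- def solution(n, control):
--     answer = 0
--     num = len(control)
--     for i in range(0, num, 1):
--         if (control[i] == 'w'):
--             n += 1
--         elif (control[i] == 's'):
--             n -= 1
--         elif (control[i] == 'd'):
--             n += 10
--         elif (control[i] == 'a'):
--             n -= 10
--
--     return n
-- ===== SOURCE B (Python) =====
-- _DELTA = {'w': 1, 's': -1, 'd': 10, 'a': -10}
--
-- def _delta(s):
--     # divide and conquer: total delta of a string = delta(left half) + delta(right half)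
--     if not s:
--         return 0
--     if len(s) == 1:
--         return _DELTA.get(s, 0)
--     m = len(s) // 2
--     return _delta(s[:m]) + _delta(s[m:])
--
-- def solution(n, control):
--     return n + _delta(control)
-- ===== Notes on version B (the rewrite author's own statement) =====
-- stated objective: alternative
-- what changed: Replaces the left-to-right index loop by a divide-and-conquer recursion: the string is split in half down to single characters, each character's delta comes from a lookup table, and the halves' deltas are summed (correct because the per-character deltas are additive and order-independent).
import Mathlib
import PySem

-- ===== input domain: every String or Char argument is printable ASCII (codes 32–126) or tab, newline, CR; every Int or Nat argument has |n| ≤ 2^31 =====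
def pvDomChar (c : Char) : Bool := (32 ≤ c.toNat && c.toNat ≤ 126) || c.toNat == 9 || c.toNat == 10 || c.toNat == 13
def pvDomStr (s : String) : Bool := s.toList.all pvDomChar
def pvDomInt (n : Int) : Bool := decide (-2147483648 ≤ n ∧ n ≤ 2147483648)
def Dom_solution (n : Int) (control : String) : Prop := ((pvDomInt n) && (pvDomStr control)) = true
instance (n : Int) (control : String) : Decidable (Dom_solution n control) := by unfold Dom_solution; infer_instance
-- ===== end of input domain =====

-- B replaces A's index loop by a divide-and-conquer recursion (halve the string, table-lookup
-- single characters, add the halves' deltas); objective: alternative decomposition, same result.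

-- ===== PORT A =====
-- for i in range(0, len(control), 1): branch on control[i] (always in range; pyGetD's default is never read)
def solutionStep (m : Int) (c : Char) : Int :=
  if c == 'w' then m + 1
  else if c == 's' then m - 1
  else if c == 'd' then m + 10
  else if c == 'a' then m - 10
  else m

def solution (n : Int) (control : String) : Int :=
  (PySem.List.pyRange 0 (control.toList.length : Int) 1).foldl
    (fun m i => solutionStep m (PySem.List.pyGetD control.toList i ' ')) n

-- ===== PORT B =====
-- _DELTA = {'w': 1, 's': -1, 'd': 10, 'a': -10}
def bTable : PySem.Dict String Int :=
  PySem.Dict.ofList [("w", 1), ("s", -1), ("d", 10), ("a", -10)]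

-- _delta(s): s[:m] / s[m:] with m = len(s)//2 (0 ≤ m ≤ len) are exactly take m / drop m
def bDelta (s : List Char) : Int :=
  if s.length = 0 then 0
  else if s.length = 1 then bTable.getD (String.ofList s) 0
  else
    let m := s.length / 2
    bDelta (s.take m) + bDelta (s.drop m)
termination_by s.length
decreasing_by
  · simp only [List.length_take]; omega
  · simp only [List.length_drop]; omega

def solution_alt (n : Int) (control : String) : Int :=
  n + bDelta control.toList

-- ===== PRECONDITION & SPEC =====
def Spec_solution (n : Int) (control : String) (out : Int) : Prop := out = solution_alt n control
instance (n : Int) (control : String) (out : Int) : Decidable (Spec_solution n control out) := by unfold Spec_solution; infer_instance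

-- ===== CLAIM (what is proved, stated in full; the proofs are below) =====
def Claim_equal_solution : Prop := ∀ (n : Int) (control : String), Dom_solution n control → Spec_solution n control (solution n control)

-- ===== LEMMAS AND PROOFS =====

-- the per-character delta both programs agree on
def charDelta (c : Char) : Int :=
  if c = 'w' then 1 else if c = 's' then -1 else if c = 'd' then 10 else if c = 'a' then -10 else 0

theorem ofList_beq (a b : List Char) : (String.ofList a == String.ofList b) = (a == b) := by
  by_cases h : a = b <;> simp [h, String.ofList_inj]

theorem bDelta_singleton (c : Char) : bDelta [c] = charDelta c := by
  have ht : bTable = PySem.Dict.mk [("w", 1), ("s", -1), ("d", 10), ("a", -10)] := by decide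
  have kw : "w" = String.ofList ['w'] := by decide
  have ks : "s" = String.ofList ['s'] := by decide
  have kd : "d" = String.ofList ['d'] := by decide
  have ka : "a" = String.ofList ['a'] := by decide
  rw [bDelta]
  simp only [List.length_cons, List.length_nil]
  norm_num
  rw [ht]
  by_cases h1 : c = 'w'
  · subst h1; decide
  by_cases h2 : c = 's'
  · subst h2; decide
  by_cases h3 : c = 'd'
  · subst h3; decide
  by_cases h4 : c = 'a'
  · subst h4; decide
  have hw : ("w" == String.ofList [c]) = false := by rw [kw, ofList_beq]; simp only [beq_eq_false_iff_ne, ne_eq, List.cons.injEq, and_true]; exact fun h => h1 h.symm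
  have hs : ("s" == String.ofList [c]) = false := by rw [ks, ofList_beq]; simp only [beq_eq_false_iff_ne, ne_eq, List.cons.injEq, and_true]; exact fun h => h2 h.symm
  have hd : ("d" == String.ofList [c]) = false := by rw [kd, ofList_beq]; simp only [beq_eq_false_iff_ne, ne_eq, List.cons.injEq, and_true]; exact fun h => h3 h.symm
  have ha : ("a" == String.ofList [c]) = false := by rw [ka, ofList_beq]; simp only [beq_eq_false_iff_ne, ne_eq, List.cons.injEq, and_true]; exact fun h => h4 h.symm
  simp [PySem.Dict.getD, PySem.Dict.get?, List.find?, hw, hs, hd, ha, charDelta, h1, h2, h3, h4]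

theorem bDelta_eq_sum (s : List Char) : bDelta s = (s.map charDelta).sum := by
  induction s using bDelta.induct with
  | case1 s h => simp [bDelta, List.eq_nil_of_length_eq_zero h]
  | case2 s h0 h1 =>
    obtain ⟨c, hc⟩ : ∃ c, s = [c] := by
      cases s with
      | nil => simp at h1
      | cons x t => cases t with
        | nil => exact ⟨x, rfl⟩
        | cons y u => simp at h1
    subst hc; simpa using bDelta_singleton c
  | case3 s h0 h1 m ih1 ih2 =>
    rw [bDelta, if_neg h0, if_neg h1]
    have : s.map charDelta = (s.take m).map charDelta ++ (s.drop m).map charDelta := by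
      rw [← List.map_append, List.take_append_drop]
    rw [this, List.sum_append, ← ih1, ← ih2]

theorem step_eq (m : Int) (c : Char) : solutionStep m c = m + charDelta c := by
  simp only [solutionStep, charDelta]
  by_cases h1 : c = 'w' <;> by_cases h2 : c = 's' <;> by_cases h3 : c = 'd' <;> by_cases h4 : c = 'a' <;>
    simp_all <;> ring

theorem foldl_step_eq (cs : List Char) (n : Int) :
    cs.foldl solutionStep n = n + (cs.map charDelta).sum := by
  induction cs generalizing n with
  | nil => simp
  | cons x t ih => simp [List.foldl_cons, step_eq, ih]; ring

-- ===== VERDICT (by name: the statement is the Claim_ definition above) =====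
theorem solution_spec : Claim_equal_solution := by
  intro n control _
  unfold Spec_solution solution solution_alt
  rw [show ((control.toList.length : Int)) = (PySem.List.len control.toList) from rfl]
  rw [PySem.List.foldl_pyRange_pyGetD control.toList ' ' solutionStep n (by omega : (0:Int) ≤ 0)]
  simp only [Int.toNat_zero, List.drop_zero]
  rw [foldl_step_eq, bDelta_eq_sum]
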